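-- pv_equiv track=rewrite | github.com/shlomo-Kallner/coventreiya | old/utils.py | gen_list
-- ===== SOURCE A (Python) =====
-- def is_item_list( item ):
--     return ( isinstance(item, list) or \
--              isinstance(item, tuple) )
--
-- def gen_str1( n , chars ):
--     """ generate all possible n length strings of chars """
--     """  - does  not use recursion -  """
--     if is_item_list(chars) and isinstance(n,int):
--         res = list()
--         for i in range(0, n):
--             if i == 0:
--                 for j in chars:
--                     t = list()
--                     t.append(j)
--                     res.append(t)
--             else:
--                 tmp = list()
--                 for j in chars:
--                     for k in res:
--                         t = list()
--                         t.extend(k)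
--                         t.append(j)
--                         tmp.append(t)
--                 res = tmp
--         return res
--     else:
--         raise TypeError()
--
-- def gen_list( max_chars, pos_chars, min_chars = 1 ):
--     result = list()
--     if not is_item_list(pos_chars) or not isinstance(max_chars,int) \
--                    or not isinstance(min_chars,int):
--         raise TypeError()
--     elif min_chars > 0 and max_chars > min_chars:
--         for i in range(min_chars, max_chars + 1):
--             tmp = gen_str1(i, pos_chars)
--             result.extend(tmp)
--         return result
--     else:
--         raise ValueError()
-- ===== SOURCE B (Python) =====
-- def gen_list(max_chars, pos_chars, min_chars=1):
--     if not isinstance(pos_chars, (list, tuple)) or not isinstance(max_chars, int) \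
--             or not isinstance(min_chars, int):
--         raise TypeError()
--     if not (min_chars > 0 and max_chars > min_chars):
--         raise ValueError()
--     b = len(pos_chars)
--     result = []
--     for n in range(min_chars, max_chars + 1):
--         for idx in range(b ** n):
--             s = []
--             for _ in range(n):
--                 s.append(pos_chars[idx % b])
--                 idx //= b
--             result.append(s)
--     return result
-- ===== Notes on version B (the rewrite author's own statement) =====
-- stated objective: alternative
-- what changed: Replaces gen_str1's incremental accumulator (rebuilding all shorter prefixes for every length) with direct base-b decoding: each string of length n is computed independently from its index in range(len(pos_chars)**n) by repeated mod/div, which reproduces A's position-0-varies-fastest order.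
import Mathlib
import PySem

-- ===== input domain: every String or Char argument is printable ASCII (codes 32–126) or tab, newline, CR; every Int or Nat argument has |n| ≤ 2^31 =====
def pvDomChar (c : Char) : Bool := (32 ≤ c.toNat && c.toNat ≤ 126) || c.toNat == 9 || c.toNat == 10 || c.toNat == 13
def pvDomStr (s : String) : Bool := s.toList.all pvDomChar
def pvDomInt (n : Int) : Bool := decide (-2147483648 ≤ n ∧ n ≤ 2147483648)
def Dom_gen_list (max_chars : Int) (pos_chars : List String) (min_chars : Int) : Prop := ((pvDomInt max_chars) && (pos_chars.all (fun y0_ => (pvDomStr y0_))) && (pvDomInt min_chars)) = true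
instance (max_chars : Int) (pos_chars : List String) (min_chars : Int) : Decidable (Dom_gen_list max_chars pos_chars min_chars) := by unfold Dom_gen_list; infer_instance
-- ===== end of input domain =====

-- B replaces gen_str1's incremental accumulator with direct base-b decoding of each
-- string from its index; equal return values on Pre_ (A/B raise ValueError outside it).

-- ===== PORT A =====
-- gen_str1(n, chars): the i/j/k loops transliterated (type guard always true: n is Int, chars a List)
def gen_str1 (n : Int) (chars : List String) : List (List String) :=
  (PySem.List.pyRange 0 n 1).foldl
    (fun res i =>
      if i = 0 then
        chars.foldl (fun res j => res ++ [[j]]) res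
      else
        chars.foldl (fun tmp j => res.foldl (fun tmp k => tmp ++ [k ++ [j]]) tmp) [])
    []

def gen_list (max_chars : Int) (pos_chars : List String) (min_chars : Int) : List (List String) :=
  -- the TypeError branch is unreachable under the Lean types
  if min_chars > 0 ∧ max_chars > min_chars then
    (PySem.List.pyRange min_chars (max_chars + 1) 1).foldl
      (fun result i => result ++ gen_str1 i pos_chars) []
  else []  -- Python raises ValueError here: excluded by Pre_gen_list

-- ===== PORT B =====
-- the inner 'for _ in range(n)' loop of Source B: peel base-b digits of idx, least significant first
-- (pyGet? is exact; its getD "" default is never used, since idx % b < b whenever the loop runs)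
def pvDecode (chars : List String) (b : Int) : Nat → Int → List String
  | 0, _ => []
  | m + 1, idx =>
      ((PySem.List.pyGet? chars (PySem.Int.mod idx b)).getD "")
        :: pvDecode chars b m (PySem.Int.floordiv idx b)

def gen_list_alt (max_chars : Int) (pos_chars : List String) (min_chars : Int) : List (List String) :=
  if min_chars > 0 ∧ max_chars > min_chars then
    (PySem.List.pyRange min_chars (max_chars + 1) 1).foldl
      (fun result n =>
        (PySem.List.pyRange 0 ((pos_chars.length : Int) ^ n.toNat) 1).foldl
          (fun result idx => result ++ [pvDecode pos_chars (pos_chars.length : Int) n.toNat idx])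
          result)
      []
  else []  -- ValueError in Source B: excluded by Pre_gen_list

-- ===== PRECONDITION & SPEC =====
-- Pre_ excludes exactly the inputs where A (and B) raise ValueError
def Pre_gen_list (max_chars : Int) (pos_chars : List String) (min_chars : Int) : Prop :=
  min_chars > 0 ∧ max_chars > min_chars
instance (max_chars : Int) (pos_chars : List String) (min_chars : Int) : Decidable (Pre_gen_list max_chars pos_chars min_chars) := by unfold Pre_gen_list; infer_instance
def pvWitness_gen_list : Int × List String × Int := (3, ["a", "b"], 1)

def Spec_gen_list (max_chars : Int) (pos_chars : List String) (min_chars : Int) (out : List (List String)) : Prop := out = gen_list_alt max_chars pos_chars min_chars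
instance (max_chars : Int) (pos_chars : List String) (min_chars : Int) (out : List (List String)) : Decidable (Spec_gen_list max_chars pos_chars min_chars out) := by unfold Spec_gen_list; infer_instance

-- ===== CLAIM (what is proved, stated in full; the proofs are below) =====
def Claim_equal_gen_list : Prop := ∀ (max_chars : Int) (pos_chars : List String) (min_chars : Int), Dom_gen_list max_chars pos_chars min_chars → Pre_gen_list max_chars pos_chars min_chars → Spec_gen_list max_chars pos_chars min_chars (gen_list max_chars pos_chars min_chars)

-- ===== LEMMAS AND PROOFS =====

-- reference value: all length-k tuples over chars, position 0 varying fastest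
def pvG (chars : List String) : Nat → List (List String)
  | 0 => [[]]
  | k + 1 => chars.flatMap (fun j => (pvG chars k).map (· ++ [j]))

-- Nat-level digit decoding
def pvDigitsN (chars : List String) : Nat → Nat → List String
  | 0, _ => []
  | m + 1, r => chars.getD (r % chars.length) "" :: pvDigitsN chars m (r / chars.length)

theorem pvDecode_natCast (chars : List String) (m : Nat) :
    ∀ r : Nat, pvDecode chars (chars.length : Int) m (r : Int) = pvDigitsN chars m r := by
  induction m with
  | zero => intro r; rfl
  | succ m ih =>
      intro r
      simp only [pvDecode, pvDigitsN, PySem.Int.mod_natCast, PySem.Int.floordiv_natCast,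
        PySem.List.pyGet?_natCast, List.getD_eq_getElem?_getD, ih]

theorem pv_range_mul (m : Nat) (f : Nat → List String) :
    ∀ b : Nat, (List.range (b * m)).map f
      = (List.range b).flatMap (fun q => (List.range m).map (fun r => f (q * m + r))) := by
  intro b
  induction b with
  | zero => simp
  | succ b ih =>
      rw [Nat.succ_mul, List.range_add, List.range_succ]
      simp [ih, List.flatMap_append, Nat.add_comm]

theorem pvDigitsN_split (chars : List String) (K : Nat) :
    ∀ q r : Nat, q < chars.length → r < chars.length ^ K →
      pvDigitsN chars (K + 1) (q * chars.length ^ K + r)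
        = pvDigitsN chars K r ++ [chars.getD q ""] := by
  induction K with
  | zero =>
      intro q r hq hr
      have hr0 : r = 0 := by simpa using hr
      subst hr0
      simp [pvDigitsN, Nat.mod_eq_of_lt hq]
  | succ K ih =>
      intro q r hq hr
      have hb : 0 < chars.length := by omega
      have h1 : (q * chars.length ^ (K + 1) + r) % chars.length = r % chars.length := by
        rw [pow_succ, ← Nat.mul_assoc, Nat.mul_comm (q * chars.length ^ K) chars.length, Nat.mul_add_mod]
      have h2 : (q * chars.length ^ (K + 1) + r) / chars.length
          = q * chars.length ^ K + r / chars.length := by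
        rw [pow_succ, ← Nat.mul_assoc, Nat.mul_comm (q * chars.length ^ K) chars.length, Nat.mul_add_div hb]
      have hr' : r / chars.length < chars.length ^ K := by
        rw [Nat.div_lt_iff_lt_mul hb]; rw [pow_succ] at hr; exact hr
      show pvDigitsN chars (K + 2) _ = _
      rw [pvDigitsN, h1, h2, ih q (r / chars.length) hq hr']
      simp [pvDigitsN]

theorem pv_flatMap_range (chars : List String) (g : String → List (List String)) :
    chars.flatMap g = (List.range chars.length).flatMap (fun q => g (chars.getD q "")) := by
  induction chars with
  | nil => simp
  | cons x l ih =>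
      rw [List.flatMap_cons, List.length_cons, List.range_succ_eq_map, List.flatMap_cons,
        List.flatMap_map]
      simp only [List.getD_cons_zero, List.getD_cons_succ]
      rw [← ih]

-- B's inner computation for length K equals pvG chars K
theorem pvB_block (chars : List String) (K : Nat) :
    (List.range (chars.length ^ K)).map (pvDigitsN chars K) = pvG chars K := by
  induction K with
  | zero => simp [pvDigitsN, pvG]
  | succ K ih =>
      have : chars.length ^ (K + 1) = chars.length * chars.length ^ K := by ring
      rw [this, pv_range_mul]
      rw [pvG, pv_flatMap_range chars (fun j => (pvG chars K).map (· ++ [j]))]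
      refine List.flatMap_congr (fun q hq => ?_)
      rw [← ih, List.map_map]
      refine List.map_congr_left (fun r hr => ?_)
      have hq' : q < chars.length := by simpa using List.mem_range.mp hq
      have hr' : r < chars.length ^ K := List.mem_range.mp hr
      exact pvDigitsN_split chars K q r hq' hr'

theorem pv_map_singleton_flatMap (l : List String) :
    l.map (fun j => [j]) = l.flatMap (fun j => [[j]]) := by
  induction l with
  | nil => rfl
  | cons x l ih => simp [ih]

-- A's gen_str1 equals pvG for positive lengths
theorem pv_gen_str1_eq (chars : List String) :
    ∀ K : Nat, 1 ≤ K → gen_str1 (K : Int) chars = pvG chars K := by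
  intro K
  induction K with
  | zero => intro h; omega
  | succ K ih =>
      intro _
      by_cases hK : 1 ≤ K
      · have hstep : (PySem.List.pyRange 0 ((K : Int) + 1) 1)
            = PySem.List.pyRange 0 (K : Int) 1 ++ [(K : Int)] := by
          exact PySem.List.pyRange_one_succ_right (by exact_mod_cast Nat.zero_le K)
        have hcast : ((K + 1 : Nat) : Int) = (K : Int) + 1 := by push_cast; ring
        unfold gen_str1
        rw [hcast, hstep, List.foldl_append]
        have hKne : ¬ ((K : Int) = 0) := by exact_mod_cast Nat.one_le_iff_ne_zero.mp hK
        simp only [List.foldl_cons, List.foldl_nil, if_neg hKne]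
        have hres : (PySem.List.pyRange 0 (K : Int) 1).foldl
            (fun res i =>
              if i = 0 then chars.foldl (fun res j => res ++ [[j]]) res
              else chars.foldl (fun tmp j => res.foldl (fun tmp k => tmp ++ [k ++ [j]]) tmp) [])
            [] = pvG chars K := ih hK
        rw [hres]
        rw [pvG]
        refine Eq.trans (PySem.List.foldl_congr_mem chars _
            (fun tmp j => tmp ++ (pvG chars K).map (· ++ [j])) []
            (fun acc x _ => PySem.List.foldl_append_singleton_eq_map (· ++ [x]) (pvG chars K) acc))
          (Eq.trans (PySem.List.foldl_append_eq_flatMap _ chars []) (List.nil_append _))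
      · have hK0 : K = 0 := by omega
        subst hK0
        unfold gen_str1
        rw [show ((1 : Nat) : Int) = (0 : Int) + 1 by ring,
          PySem.List.pyRange_one_succ_right (le_refl 0), PySem.List.pyRange_one_eq_nil (le_refl 0)]
        simp only [List.nil_append, List.foldl_cons, List.foldl_nil]
        rw [PySem.List.foldl_append_singleton_eq_map (fun j => [j]) chars []]
        simp only [pvG, List.nil_append]
        simpa using pv_map_singleton_flatMap chars

-- B's per-length fold equals appending pvG
theorem pvB_length_step (chars : List String) (K : Nat) (acc : List (List String)) :
    (PySem.List.pyRange 0 ((chars.length : Int) ^ K) 1).foldl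
      (fun result idx => result ++ [pvDecode chars (chars.length : Int) K idx]) acc
      = acc ++ pvG chars K := by
  rw [PySem.List.foldl_append_singleton_eq_map (fun idx => pvDecode chars (chars.length : Int) K idx) _ acc]
  congr 1
  have hN : ((chars.length : Int) ^ K) = ((chars.length ^ K : Nat) : Int) := by push_cast; ring
  rw [hN, PySem.List.pyRange_zero_nat]
  rw [List.map_map]
  rw [← pvB_block chars K]
  refine List.map_congr_left (fun r _ => ?_)
  exact pvDecode_natCast chars K r

-- ===== VERDICT (by name: the statement is the Claim_ definition above) =====
theorem gen_list_spec : Claim_equal_gen_list := by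
  intro max_chars pos_chars min_chars _ hpre
  obtain ⟨h1, h2⟩ := hpre
  show gen_list max_chars pos_chars min_chars = gen_list_alt max_chars pos_chars min_chars
  unfold gen_list gen_list_alt
  rw [if_pos ⟨h1, h2⟩, if_pos ⟨h1, h2⟩]
  refine PySem.List.foldl_congr_mem _ _ _ _ (fun acc i hi => ?_)
  have hmem := (PySem.List.mem_pyRange_one).mp hi
  have hi1 : 1 ≤ i := le_trans h1 hmem.1
  have hcast : i = ((i.toNat : Nat) : Int) := by omega
  have htn : 1 ≤ i.toNat := by omega
  rw [pvB_length_step pos_chars i.toNat acc]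
  conv_lhs => rw [hcast]
  rw [pv_gen_str1_eq pos_chars i.toNat htn]
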